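-- pv_equiv track=rewrite | github.com/fieserWolF/convertron3000 | convertron.py | convert_to_hitherdither_palette
-- ===== SOURCE A (Python) =====
-- def convert_to_hitherdither_palette (
--     palette_rgb
-- ) :
--     pal = []
--     cnt = 0
--     for value in palette_rgb :
--         if (cnt == 0 ) : r = value
--         if (cnt == 1 ) : g = value
--         if (cnt == 2 ) :
--             b = value
--             rgb = (r * 256 * 256) + (g * 256) + b
--             pal.append(rgb)
--             cnt = -1
--         cnt += 1
--     return pal
-- ===== SOURCE B (Python) =====
-- def convert_to_hitherdither_palette(palette_rgb):
--     return [r * 65536 + g * 256 + b for r, g, b in zip(*[iter(palette_rgb)] * 3)]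
-- ===== Notes on version B (the rewrite author's own statement) =====
-- stated objective: idiomatic
-- what changed: Replaces the per-element cnt state machine (with carried r/g variables and a reset to -1) by grouping the flat iterable into consecutive (r,g,b) triples via zip(*[iter(...)]*3) and a single comprehension; an incomplete trailing group is still dropped.
import Mathlib
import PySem

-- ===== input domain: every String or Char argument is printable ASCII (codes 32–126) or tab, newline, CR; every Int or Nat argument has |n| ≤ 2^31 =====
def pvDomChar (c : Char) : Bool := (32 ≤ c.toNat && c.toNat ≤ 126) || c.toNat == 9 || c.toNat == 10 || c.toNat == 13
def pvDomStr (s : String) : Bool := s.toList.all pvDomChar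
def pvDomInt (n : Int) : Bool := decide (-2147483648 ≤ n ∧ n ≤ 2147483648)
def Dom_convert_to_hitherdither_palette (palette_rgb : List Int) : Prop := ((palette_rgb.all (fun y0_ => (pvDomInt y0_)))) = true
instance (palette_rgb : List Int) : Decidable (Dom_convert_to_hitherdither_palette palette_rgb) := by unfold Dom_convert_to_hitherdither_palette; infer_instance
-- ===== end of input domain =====

-- B replaces A's per-element cnt state machine by grouping into consecutive (r,g,b) triples (idiomatic decomposition, same cost).
-- ===== PORT A =====
-- literal port of A's for-loop: state (pal, cnt, r, g); b merges into the cnt==2 branch as in the source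
def pvLoopA : List Int → List Int → Int → Int → Int → List Int
  | [], pal, _, _, _ => pal
  | value :: rest, pal, cnt, r, g =>
    let r := if cnt == 0 then value else r
    let g := if cnt == 1 then value else g
    if cnt == 2 then
      pvLoopA rest (pal ++ [r * 256 * 256 + g * 256 + value]) 0 r g
    else
      pvLoopA rest pal (cnt + 1) r g

def convert_to_hitherdither_palette (palette_rgb : List Int) : List Int :=
  pvLoopA palette_rgb [] 0 0 0

-- ===== PORT B =====
-- literal port of B: consume the list three at a time, dropping an incomplete trailing group
def convert_to_hitherdither_palette_alt : List Int → List Int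
  | r :: g :: b :: rest => (r * 65536 + g * 256 + b) :: convert_to_hitherdither_palette_alt rest
  | _ => []

-- ===== PRECONDITION & SPEC =====
def Spec_convert_to_hitherdither_palette (palette_rgb : List Int) (out : List Int) : Prop := out = convert_to_hitherdither_palette_alt palette_rgb
instance (palette_rgb : List Int) (out : List Int) : Decidable (Spec_convert_to_hitherdither_palette palette_rgb out) := by unfold Spec_convert_to_hitherdither_palette; infer_instance

-- ===== CLAIM (what is proved, stated in full; the proofs are below) =====
def Claim_equal_convert_to_hitherdither_palette : Prop := ∀ (palette_rgb : List Int), Dom_convert_to_hitherdither_palette palette_rgb → Spec_convert_to_hitherdither_palette palette_rgb (convert_to_hitherdither_palette palette_rgb)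

-- ===== LEMMAS AND PROOFS =====
-- loop invariant: from cnt = 0 the loop appends exactly the packed triples of the remaining list
theorem pvLoopA_eq (l : List Int) : ∀ pal r g, pvLoopA l pal 0 r g = pal ++ convert_to_hitherdither_palette_alt l := by
  induction l using convert_to_hitherdither_palette_alt.induct with
  | case1 a b c rest ih =>
      intro pal r g
      simp [pvLoopA, convert_to_hitherdither_palette_alt, ih]
      ring_nf
  | case2 l h1 =>
      intro pal r g
      match l, h1 with
      | [], _ => simp [pvLoopA, convert_to_hitherdither_palette_alt]
      | [a], _ => simp [pvLoopA, convert_to_hitherdither_palette_alt]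
      | [a, b], _ => simp [pvLoopA, convert_to_hitherdither_palette_alt]
      | a :: b :: c :: rest, h => exact absurd rfl (h a b c rest)

-- ===== VERDICT (by name: the statement is the Claim_ definition above) =====
theorem convert_to_hitherdither_palette_spec : Claim_equal_convert_to_hitherdither_palette := by
  intro l _
  unfold Spec_convert_to_hitherdither_palette convert_to_hitherdither_palette
  simp [pvLoopA_eq]
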